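-- pv_equiv track=rewrite | github.com/bdara2122/praktika-piton | praktika-8.py | find_matching_row_col_indices
-- ===== SOURCE A (Python) =====
-- def find_matching_row_col_indices(matrix):
--     """
--     Находит индексы k (от 1 до n), для которых k-я строка совпадает с k-м столбцом.
--
--     Параметры:
--         matrix — список списков, квадратная матрица n×n.
--
--     Возвращает:
--         Список индексов k (в человекочитаемой нумерации, от 1).
--     """
--     n = len(matrix)
--     result = []
--
--     for k in range(n):  # k — индекс в нулевом отсчёте (0, 1, ..., n-1)
--         row = matrix[k]  # k-я строка
--         col = [matrix[i][k] for i in range(n)]  # k-й столбец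
--
--         if row == col:
--             result.append(k + 1)  # перевод в нумерацию с 1
--
--
--     return result
-- ===== SOURCE B (Python) =====
-- def find_matching_row_col_indices(matrix):
--     n = len(matrix)
--     bad = [len(row) != n for row in matrix]
--     for i in range(n):
--         for j in range(i + 1, n):
--             if matrix[i][j] != matrix[j][i]:
--                 bad[i] = True
--                 bad[j] = True
--     return [k + 1 for k in range(n) if not bad[k]]
-- ===== Notes on version B (the rewrite author's own statement) =====
-- stated objective: alternative
-- what changed: Instead of rebuilding the k-th column and comparing whole lists for every k, B does one triangular scan that compares each symmetric pair (i,j), i<j, exactly once, marks both rows bad on a mismatch (plus a row-length pre-check), then emits the unmarked 1-based indices.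
import Mathlib
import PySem

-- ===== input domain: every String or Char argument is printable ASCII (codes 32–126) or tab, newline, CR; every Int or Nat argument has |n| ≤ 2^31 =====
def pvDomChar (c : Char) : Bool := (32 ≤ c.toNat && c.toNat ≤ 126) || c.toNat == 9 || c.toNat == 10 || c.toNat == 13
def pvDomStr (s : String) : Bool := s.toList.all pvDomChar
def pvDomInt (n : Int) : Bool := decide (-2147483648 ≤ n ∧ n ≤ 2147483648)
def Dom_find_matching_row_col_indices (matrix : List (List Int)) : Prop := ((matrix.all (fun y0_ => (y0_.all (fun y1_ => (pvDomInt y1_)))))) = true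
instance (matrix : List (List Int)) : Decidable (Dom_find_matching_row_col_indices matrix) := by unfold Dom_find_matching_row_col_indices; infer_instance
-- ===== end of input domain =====

-- B replaces A's per-k column rebuild and whole-list comparison by a single triangular scan that
-- compares each symmetric pair (i,j), i<j, once and marks both rows bad on a mismatch (plus a
-- row-length pre-check); an alternative algorithm, same asymptotic cost.

-- ===== PORT A =====
def find_matching_row_col_indices (matrix : List (List Int)) : List Int :=
  let n : Int := matrix.length
  (PySem.List.pyRange 0 n 1).foldl (fun result k =>
    let row := PySem.List.pyGetD matrix k []
    let col := (PySem.List.pyRange 0 n 1).map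
      (fun i => PySem.List.pyGetD (PySem.List.pyGetD matrix i []) k 0)
    if row == col then result ++ [k + 1] else result) []

-- ===== PORT B =====
-- bad[i] = True / bad[j] = True are Python list assignments: List.set at the (nonnegative,
-- in-range on Pre_) index.
def find_matching_row_col_indices_alt (matrix : List (List Int)) : List Int :=
  let n : Int := matrix.length
  let bad : List Bool := matrix.map (fun row => decide (¬((row.length : Int) = n)))
  let bad := (PySem.List.pyRange 0 n 1).foldl (fun bad i =>
      (PySem.List.pyRange (i + 1) n 1).foldl (fun bad j =>
        if PySem.List.pyGetD (PySem.List.pyGetD matrix i []) j 0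
             ≠ PySem.List.pyGetD (PySem.List.pyGetD matrix j []) i 0
        then (bad.set i.toNat true).set j.toNat true
        else bad) bad) bad
  (PySem.List.pyRange 0 n 1).filterMap (fun k =>
    if PySem.List.pyGetD bad k false = false then some (k + 1) else none)

-- ===== PRECONDITION & SPEC =====
-- Pre_ excludes ragged matrices having a row shorter than len(matrix): A raises IndexError there
-- while building a column (and B's pair scan may raise too).
def Pre_find_matching_row_col_indices (matrix : List (List Int)) : Prop :=
  ∀ row ∈ matrix, matrix.length ≤ row.length
instance (matrix : List (List Int)) : Decidable (Pre_find_matching_row_col_indices matrix) := by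
  unfold Pre_find_matching_row_col_indices; infer_instance
def pvWitness_find_matching_row_col_indices : List (List Int) := [[1, 2], [2, 3]]

def Spec_find_matching_row_col_indices (matrix : List (List Int)) (out : List Int) : Prop := out = find_matching_row_col_indices_alt matrix
instance (matrix : List (List Int)) (out : List Int) : Decidable (Spec_find_matching_row_col_indices matrix out) := by unfold Spec_find_matching_row_col_indices; infer_instance

-- ===== CLAIM =====
def Claim_equal_find_matching_row_col_indices : Prop := ∀ (matrix : List (List Int)), Dom_find_matching_row_col_indices matrix → Pre_find_matching_row_col_indices matrix → Spec_find_matching_row_col_indices matrix (find_matching_row_col_indices matrix)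

-- ===== LEMMAS AND PROOFS =====

-- matrix[a][b] as both ports read it
def pvM (matrix : List (List Int)) (a b : Int) : Int :=
  PySem.List.pyGetD (PySem.List.pyGetD matrix a []) b 0

-- one step of B's pair scan
def pvStep (matrix : List (List Int)) (bad : List Bool) (p : Int × Int) : List Bool :=
  if pvM matrix p.1 p.2 ≠ pvM matrix p.2 p.1
  then (bad.set p.1.toNat true).set p.2.toNat true
  else bad

theorem pv_getD_set (bad : List Bool) (m k : Nat) (h : m < bad.length) :
    (bad.set m true).getD k false = (bad.getD k false || decide (k = m)) := by
  rcases eq_or_ne k m with rfl | hne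
  · simp [List.getD, h]
  · simp [List.getD, List.getElem?_set_ne (Ne.symm hne), hne]

theorem pv_step_length (matrix : List (List Int)) (bad : List Bool) (p : Int × Int) :
    (pvStep matrix bad p).length = bad.length := by
  unfold pvStep; split <;> simp

theorem pv_foldl_pairs (matrix : List (List Int)) (L : List (Int × Int)) :
    ∀ (bad : List Bool) (k : Nat),
    (∀ p ∈ L, 0 ≤ p.1 ∧ p.1 < (bad.length : Int) ∧ 0 ≤ p.2 ∧ p.2 < (bad.length : Int)) →
    (L.foldl (pvStep matrix) bad).getD k false
      = (bad.getD k false ||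
          L.any (fun p => decide (pvM matrix p.1 p.2 ≠ pvM matrix p.2 p.1)
                          && (decide (k = p.1.toNat) || decide (k = p.2.toNat)))) := by
  induction L with
  | nil => intro bad k _; simp
  | cons p L ih =>
    intro bad k hb
    have hp := hb p (by simp)
    have hlen : (pvStep matrix bad p).length = bad.length := pv_step_length ..
    rw [List.foldl_cons, ih _ k (by intro q hq; rw [hlen]; exact hb q (by simp [hq]))]
    unfold pvStep
    split
    · rename_i hmis
      have h1 : p.1.toNat < bad.length := by omega
      have h2 : p.2.toNat < ((bad.set p.1.toNat true)).length := by simp; omega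
      rw [pv_getD_set _ _ _ h2, pv_getD_set _ _ _ h1]
      simp [hmis]
      by_cases e1 : k = p.1.toNat <;> by_cases e2 : k = p.2.toNat <;> simp [e1, e2]
    · rename_i hmis
      rw [not_not] at hmis
      simp [hmis]

theorem pv_filterMap_ite {α β : Type} (c : α → Prop) [DecidablePred c] (f : α → β) (l : List α) :
    (l.filterMap fun x => if c x then some (f x) else none)
      = ((l.filter (fun x => decide (c x))).map f) := by
  induction l with
  | nil => rfl
  | cons a l ih => by_cases h : c a <;> simp [h, ih]

def pvPairs (n : Int) : List (Int × Int) :=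
  (PySem.List.pyRange 0 n 1).flatMap (fun i => (PySem.List.pyRange (i + 1) n 1).map (fun j => (i, j)))

def pvBad0 (matrix : List (List Int)) : List Bool :=
  matrix.map (fun row => decide (¬((row.length : Int) = (matrix.length : Int))))

def pvOK (matrix : List (List Int)) (k : Nat) : Prop :=
  (matrix.getD k []).length = matrix.length ∧
  ∀ i < matrix.length, pvM matrix (↑k) (↑i) = pvM matrix (↑i) (↑k)

theorem pv_mem_pairs {n : Int} {p : Int × Int} :
    p ∈ pvPairs n ↔ 0 ≤ p.1 ∧ p.1 < p.2 ∧ p.2 < n := by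
  obtain ⟨i, j⟩ := p
  simp only [pvPairs, List.mem_flatMap, List.mem_map, PySem.List.mem_pyRange_one, Prod.mk.injEq]
  constructor
  · rintro ⟨a, ⟨ha0, han⟩, b, ⟨hab, hbn⟩, rfl, rfl⟩; exact ⟨ha0, by omega, hbn⟩
  · rintro ⟨h0, h12, h2n⟩; exact ⟨i, ⟨h0, by omega⟩, j, ⟨by omega, h2n⟩, rfl, rfl⟩

theorem pv_nest (matrix : List (List Int)) (bad : List Bool) :
    (PySem.List.pyRange 0 (matrix.length : Int) 1).foldl (fun bad i =>
      (PySem.List.pyRange (i + 1) (matrix.length : Int) 1).foldl (fun bad j =>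
        if PySem.List.pyGetD (PySem.List.pyGetD matrix i []) j 0
             ≠ PySem.List.pyGetD (PySem.List.pyGetD matrix j []) i 0
        then (bad.set i.toNat true).set j.toNat true
        else bad) bad) bad
    = (pvPairs (matrix.length : Int)).foldl (pvStep matrix) bad := by
  rw [pvPairs, List.foldl_flatMap]
  simp only [List.foldl_map]
  rfl

theorem pv_bridge (matrix : List (List Int)) (k n : Nat) (hk : k < n) :
    (∀ p ∈ pvPairs (n : Int),
        ¬(pvM matrix p.1 p.2 ≠ pvM matrix p.2 p.1 ∧ (k = p.1.toNat ∨ k = p.2.toNat)))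
    ↔ ∀ i < n, pvM matrix (↑k) (↑i) = pvM matrix (↑i) (↑k) := by
  constructor
  · intro h i hi
    by_contra hne
    rcases Nat.lt_trichotomy i k with hik | rfl | hki
    · exact h ((i : Int), (k : Int))
        (pv_mem_pairs.mpr ⟨by omega, by show (i : Int) < (k : Int); exact_mod_cast hik,
          by show (k : Int) < (n : Int); exact_mod_cast hk⟩)
        ⟨fun e => hne e.symm, Or.inr (by simp)⟩
    · exact hne rfl
    · exact h ((k : Int), (i : Int))
        (pv_mem_pairs.mpr ⟨by omega, by show (k : Int) < (i : Int); exact_mod_cast hki,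
          by show (i : Int) < (n : Int); exact_mod_cast hi⟩)
        ⟨hne, Or.inl (by simp)⟩
  · rintro h p hp ⟨hmis, hkp⟩
    rcases pv_mem_pairs.mp hp with ⟨h0, h12, h2n⟩
    rcases hkp with e | e
    · have hp1 : p.1 = (k : Int) := by omega
      have hp2 : p.2 = ((p.2.toNat : Nat) : Int) := by omega
      rw [hp1, hp2] at hmis
      exact hmis (h p.2.toNat (by omega))
    · have hp2 : p.2 = (k : Int) := by omega
      have hp1 : p.1 = ((p.1.toNat : Nat) : Int) := by omega
      rw [hp1, hp2] at hmis
      exact hmis ((h p.1.toNat (by omega)).symm)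

theorem pv_bad0_getD (matrix : List (List Int)) (k : Nat) (hk : k < matrix.length) :
    (pvBad0 matrix).getD k false
      = decide (¬(((matrix.getD k []).length : Int) = (matrix.length : Int))) := by
  have hk' : k < (pvBad0 matrix).length := by simpa [pvBad0] using hk
  rw [List.getD_eq_getElem _ _ hk', List.getD_eq_getElem _ _ hk]
  simp [pvBad0]

theorem pv_cond_iff (matrix : List (List Int)) (k : Nat) (hk : k < matrix.length) :
    (((pvPairs (matrix.length : Int)).foldl (pvStep matrix) (pvBad0 matrix)).getD k false = false)
    ↔ pvOK matrix k := by
  have hlen0 : (pvBad0 matrix).length = matrix.length := by simp [pvBad0]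
  rw [pv_foldl_pairs matrix _ _ k (by
    intro p hp
    rcases pv_mem_pairs.mp hp with ⟨h0, h12, h2n⟩
    rw [hlen0]
    exact ⟨h0, by omega, by omega, h2n⟩)]
  rw [Bool.or_eq_false_iff, pv_bad0_getD matrix k hk, List.any_eq_false]
  unfold pvOK
  constructor
  · rintro ⟨hlenb, hanyb⟩
    have hlen' : (((matrix.getD k []).length : Int)) = ((matrix.length : Nat) : Int) :=
      not_not.mp (of_decide_eq_false hlenb)
    have h2 : (matrix.getD k []).length = matrix.length := by exact_mod_cast hlen'
    refine ⟨h2, ?_⟩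
    refine (pv_bridge matrix k matrix.length hk).mp ?_
    intro p hp hc
    have hb := hanyb p hp
    simp only [Bool.and_eq_true, decide_eq_true_eq, Bool.or_eq_true] at hb
    exact hb ⟨hc.1, hc.2⟩
  · rintro ⟨hlen, hall⟩
    have h1 : decide (¬(((matrix.getD k []).length : Int) = (matrix.length : Int))) = false := by
      simp
      exact hlen
    refine ⟨h1, ?_⟩
    intro p hp
    have := (pv_bridge matrix k matrix.length hk).mpr hall p hp
    simp only [Bool.and_eq_true, decide_eq_true_eq, Bool.or_eq_true, not_and_or] at this ⊢
    tauto

theorem pv_row_eq_col_iff (matrix : List (List Int))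
    (hpre : ∀ row ∈ matrix, matrix.length ≤ row.length) (k : Nat) (hk : k < matrix.length) :
    (PySem.List.pyGetD matrix (↑k) [] =
      (PySem.List.pyRange 0 (matrix.length : Int) 1).map
        (fun i => PySem.List.pyGetD (PySem.List.pyGetD matrix i []) (↑k) 0))
    ↔ pvOK matrix k := by
  rw [PySem.List.pyGetD_natCast, PySem.List.pyRange_zero_natCast, List.map_map]
  have hcol : ((fun i => PySem.List.pyGetD (PySem.List.pyGetD matrix i []) (↑k) 0) ∘ (fun i : Nat => (i : Int)))
      = fun i : Nat => pvM matrix (↑i) (↑k) := rfl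
  rw [hcol]
  have hrowlen : matrix.length ≤ (matrix.getD k []).length := by
    rw [List.getD_eq_getElem _ _ hk]
    exact hpre _ (List.getElem_mem hk)
  have hMk : ∀ i : Nat, i < matrix.length →
      pvM matrix (↑k) (↑i) = (matrix.getD k []).getD i 0 := by
    intro i hi
    simp [pvM, PySem.List.pyGetD_natCast]
  constructor
  · intro he
    have hlen : (matrix.getD k []).length = matrix.length := by rw [he]; simp
    refine ⟨hlen, ?_⟩
    intro i hi
    have hmapD : (List.map (fun i : Nat => pvM matrix (↑i) (↑k)) (List.range matrix.length)).getD i 0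
        = pvM matrix (↑i) (↑k) := by
      rw [List.getD_eq_getElem _ _ (by simpa using hi)]
      simp
    rw [hMk i hi, he, hmapD]
  · rintro ⟨hlen, hall⟩
    apply List.ext_getElem (by simp only [List.length_map, List.length_range]; exact hlen)
    intro i hi1 hi2
    have hin : i < matrix.length := by omega
    have := hall i hin
    rw [hMk i hin, List.getD_eq_getElem _ _ (by omega)] at this
    simpa using this

theorem pv_main (matrix : List (List Int))
    (hpre : ∀ row ∈ matrix, matrix.length ≤ row.length) :
    find_matching_row_col_indices matrix = find_matching_row_col_indices_alt matrix := by
  have halt : find_matching_row_col_indices_alt matrix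
      = (PySem.List.pyRange 0 (matrix.length : Int) 1).filterMap (fun kk =>
          if PySem.List.pyGetD
              ((pvPairs (matrix.length : Int)).foldl (pvStep matrix) (pvBad0 matrix)) kk false = false
          then some (kk + 1) else none) := by
    show (PySem.List.pyRange 0 (matrix.length : Int) 1).filterMap (fun kk =>
          if PySem.List.pyGetD
              ((PySem.List.pyRange 0 (matrix.length : Int) 1).foldl (fun bad i =>
                (PySem.List.pyRange (i + 1) (matrix.length : Int) 1).foldl (fun bad j =>
                  if PySem.List.pyGetD (PySem.List.pyGetD matrix i []) j 0
                       ≠ PySem.List.pyGetD (PySem.List.pyGetD matrix j []) i 0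
                  then (bad.set i.toNat true).set j.toNat true
                  else bad) bad) (pvBad0 matrix)) kk false = false
          then some (kk + 1) else none) = _
    rw [pv_nest]
  rw [halt, pv_filterMap_ite]
  unfold find_matching_row_col_indices
  rw [PySem.List.foldl_append_if]
  rw [List.nil_append]
  refine congrArg (List.map _) (List.filter_congr ?_)
  intro kk hkk
  rw [PySem.List.mem_pyRange_one] at hkk
  obtain ⟨k, rfl⟩ : ∃ k : Nat, kk = (k : Int) := ⟨kk.toNat, by omega⟩
  have hk : k < matrix.length := by exact_mod_cast hkk.2
  rw [PySem.List.pyGetD_natCast (d := false)]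
  have hA := pv_row_eq_col_iff matrix hpre k hk
  have hB := pv_cond_iff matrix k hk
  apply Bool.eq_iff_iff.mpr
  simp only [beq_iff_eq, decide_eq_true_eq]
  exact hA.trans hB.symm

-- ===== VERDICT =====
theorem find_matching_row_col_indices_spec : Claim_equal_find_matching_row_col_indices := by
  intro matrix _ hpre
  unfold Spec_find_matching_row_col_indices
  exact pv_main matrix hpre
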